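-- pv_equiv track=rewrite | github.com/huynhngoc/hnc-outcome-analysis | outcome_traditional_radiomics.py | large_swap
-- ===== SOURCE A (Python) =====
-- def large_swap(original):
--     res = [original]
--     for i in range(3, -1, -1):
--         new_str = res[-1].copy()
--         new_str[4] = res[-1][i]
--         new_str[i] = res[-1][4]
--         res.append(new_str)
--     return res
-- ===== SOURCE B (Python) =====
-- def large_swap(original):
--     # Each cumulative swap in A amounts to left-rotating the window
--     # original[j:5] of the untouched input: build every row directly
--     # from `original` instead of from the previous row.
--     res = [original]
--     for j in range(3, -1, -1):
--         res.append(original[:j] + original[j + 1:5] + [original[j]] + original[5:])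
--     return res
-- ===== Notes on version B (the rewrite author's own statement) =====
-- stated objective: alternative
-- what changed: Each output row is built directly from the untouched input as a left rotation of the window original[j:5] via slicing, instead of cumulatively copying and swapping the previous row.
import Mathlib
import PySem

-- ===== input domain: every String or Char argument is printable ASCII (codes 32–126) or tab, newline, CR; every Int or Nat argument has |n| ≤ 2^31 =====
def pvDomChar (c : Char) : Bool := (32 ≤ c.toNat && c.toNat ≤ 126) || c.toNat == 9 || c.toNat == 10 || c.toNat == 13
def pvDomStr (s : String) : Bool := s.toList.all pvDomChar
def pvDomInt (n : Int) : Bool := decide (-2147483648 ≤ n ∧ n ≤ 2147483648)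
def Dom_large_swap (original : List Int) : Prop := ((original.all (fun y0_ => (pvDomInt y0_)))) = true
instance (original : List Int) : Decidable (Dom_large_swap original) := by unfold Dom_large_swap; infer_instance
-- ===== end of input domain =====

-- B builds each output row directly from the untouched input as a rotation of the window original[j:5], instead of A's cumulative copy-and-swap of the previous row.
-- ===== PORT A =====
-- loop body of A: new_str = res[-1].copy(); new_str[4] = res[-1][i]; new_str[i] = res[-1][4]; res.append(new_str)
def large_swap_step (res : List (List Int)) (i : Int) : List (List Int) :=
  let prev := PySem.List.pyGetD res (-1) []
  let new_str := PySem.List.pySetD prev 4 (PySem.List.pyGetD prev i 0)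
  let new_str := PySem.List.pySetD new_str i (PySem.List.pyGetD prev 4 0)
  res ++ [new_str]

def large_swap (original : List Int) : List (List Int) :=
  (PySem.List.pyRange 3 (-1) (-1)).foldl large_swap_step [original]

-- ===== PORT B =====
-- one row of B: original[:j] + original[j+1:5] + [original[j]] + original[5:]
def large_swap_alt_row (original : List Int) (j : Int) : List Int :=
  PySem.List.slice original none (some j) ++
  PySem.List.slice original (some (j + 1)) (some 5) ++
  [PySem.List.pyGetD original j 0] ++
  PySem.List.slice original (some 5) none

def large_swap_alt (original : List Int) : List (List Int) :=
  (PySem.List.pyRange 3 (-1) (-1)).foldl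
    (fun res j => res ++ [large_swap_alt_row original j]) [original]

-- ===== PRECONDITION & SPEC =====
-- Pre_ excludes lists shorter than 5, on which A raises IndexError (index 4 out of range).
def Pre_large_swap (original : List Int) : Prop := 5 ≤ original.length
instance (original : List Int) : Decidable (Pre_large_swap original) := by unfold Pre_large_swap; infer_instance
def pvWitness_large_swap : List Int := [1, 2, 3, 4, 5, 6]
def Spec_large_swap (original : List Int) (out : List (List Int)) : Prop := out = large_swap_alt original
instance (original : List Int) (out : List (List Int)) : Decidable (Spec_large_swap original out) := by unfold Spec_large_swap; infer_instance

-- ===== CLAIM (what is proved, stated in full; the proofs are below) =====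
def Claim_equal_large_swap : Prop := ∀ (original : List Int), Dom_large_swap original → Pre_large_swap original → Spec_large_swap original (large_swap original)

-- ===== LEMMAS AND PROOFS =====

lemma pyRange_3_down : PySem.List.pyRange 3 (-1) (-1) = [3, 2, 1, 0] := by decide

lemma stepA_1 (a b c d e : Int) (t : List Int) :
    large_swap_step [a::b::c::d::e::t] (3 : Int) = [a::b::c::d::e::t, a::b::c::e::d::t] := by
  have hprev : PySem.List.pyGetD [a::b::c::d::e::t] (-1) ([] : List Int) = a::b::c::d::e::t := by simp [pysem]
  have hgi : PySem.List.pyGetD (a::b::c::d::e::t) (3 : Int) 0 = d := by simp [pysem]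
  have hg4 : PySem.List.pyGetD (a::b::c::d::e::t) (4 : Int) 0 = e := by simp [pysem]
  have hs1 : PySem.List.pySetD (a::b::c::d::e::t) 4 d = a::b::c::d::d::t := by simp [pysem]
  have hs2 : PySem.List.pySetD (a::b::c::d::d::t) (3 : Int) e = a::b::c::e::d::t := by simp [pysem]
  simp only [large_swap_step, hprev, hgi, hg4, hs1, hs2]
  rfl

lemma stepA_2 (a b c d e : Int) (t : List Int) :
    large_swap_step [a::b::c::d::e::t, a::b::c::e::d::t] (2 : Int) = [a::b::c::d::e::t, a::b::c::e::d::t, a::b::d::e::c::t] := by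
  have hprev : PySem.List.pyGetD [a::b::c::d::e::t, a::b::c::e::d::t] (-1) ([] : List Int) = a::b::c::e::d::t := by simp [pysem]
  have hgi : PySem.List.pyGetD (a::b::c::e::d::t) (2 : Int) 0 = c := by simp [pysem]
  have hg4 : PySem.List.pyGetD (a::b::c::e::d::t) (4 : Int) 0 = d := by simp [pysem]
  have hs1 : PySem.List.pySetD (a::b::c::e::d::t) 4 c = a::b::c::e::c::t := by simp [pysem]
  have hs2 : PySem.List.pySetD (a::b::c::e::c::t) (2 : Int) d = a::b::d::e::c::t := by simp [pysem]
  simp only [large_swap_step, hprev, hgi, hg4, hs1, hs2]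
  rfl

lemma stepA_3 (a b c d e : Int) (t : List Int) :
    large_swap_step [a::b::c::d::e::t, a::b::c::e::d::t, a::b::d::e::c::t] (1 : Int) = [a::b::c::d::e::t, a::b::c::e::d::t, a::b::d::e::c::t, a::c::d::e::b::t] := by
  have hprev : PySem.List.pyGetD [a::b::c::d::e::t, a::b::c::e::d::t, a::b::d::e::c::t] (-1) ([] : List Int) = a::b::d::e::c::t := by simp [pysem]
  have hgi : PySem.List.pyGetD (a::b::d::e::c::t) (1 : Int) 0 = b := by simp [pysem]
  have hg4 : PySem.List.pyGetD (a::b::d::e::c::t) (4 : Int) 0 = c := by simp [pysem]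
  have hs1 : PySem.List.pySetD (a::b::d::e::c::t) 4 b = a::b::d::e::b::t := by simp [pysem]
  have hs2 : PySem.List.pySetD (a::b::d::e::b::t) (1 : Int) c = a::c::d::e::b::t := by simp [pysem]
  simp only [large_swap_step, hprev, hgi, hg4, hs1, hs2]
  rfl

lemma stepA_4 (a b c d e : Int) (t : List Int) :
    large_swap_step [a::b::c::d::e::t, a::b::c::e::d::t, a::b::d::e::c::t, a::c::d::e::b::t] (0 : Int) = [a::b::c::d::e::t, a::b::c::e::d::t, a::b::d::e::c::t, a::c::d::e::b::t, b::c::d::e::a::t] := by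
  have hprev : PySem.List.pyGetD [a::b::c::d::e::t, a::b::c::e::d::t, a::b::d::e::c::t, a::c::d::e::b::t] (-1) ([] : List Int) = a::c::d::e::b::t := by simp [pysem]
  have hgi : PySem.List.pyGetD (a::c::d::e::b::t) (0 : Int) 0 = a := by simp [pysem]
  have hg4 : PySem.List.pyGetD (a::c::d::e::b::t) (4 : Int) 0 = b := by simp [pysem]
  have hs1 : PySem.List.pySetD (a::c::d::e::b::t) 4 a = a::c::d::e::a::t := by simp [pysem]
  have hs2 : PySem.List.pySetD (a::c::d::e::a::t) (0 : Int) b = b::c::d::e::a::t := by simp [pysem]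
  simp only [large_swap_step, hprev, hgi, hg4, hs1, hs2]
  rfl

lemma rowB_1 (a b c d e : Int) (t : List Int) :
    large_swap_alt_row (a::b::c::d::e::t) (3 : Int) = a::b::c::e::d::t := by
  have h1 : PySem.List.slice (a::b::c::d::e::t) none (some (3 : Int)) = [a,b,c] := by simp [pysem]
  have h2 : PySem.List.slice (a::b::c::d::e::t) (some ((3 : Int) + 1)) (some 5) = [e] := by norm_num; rw [PySem.List.slice_toNat _ (by norm_num) (by norm_num)]; rfl
  have h3 : PySem.List.pyGetD (a::b::c::d::e::t) (3 : Int) 0 = d := by simp [pysem]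
  have h4 : PySem.List.slice (a::b::c::d::e::t) (some 5) none = t := by simp [pysem]
  simp only [large_swap_alt_row, h1, h2, h3, h4]
  rfl

lemma rowB_2 (a b c d e : Int) (t : List Int) :
    large_swap_alt_row (a::b::c::d::e::t) (2 : Int) = a::b::d::e::c::t := by
  have h1 : PySem.List.slice (a::b::c::d::e::t) none (some (2 : Int)) = [a,b] := by simp [pysem]
  have h2 : PySem.List.slice (a::b::c::d::e::t) (some ((2 : Int) + 1)) (some 5) = [d,e] := by norm_num; rw [PySem.List.slice_toNat _ (by norm_num) (by norm_num)]; rfl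
  have h3 : PySem.List.pyGetD (a::b::c::d::e::t) (2 : Int) 0 = c := by simp [pysem]
  have h4 : PySem.List.slice (a::b::c::d::e::t) (some 5) none = t := by simp [pysem]
  simp only [large_swap_alt_row, h1, h2, h3, h4]
  rfl

lemma rowB_3 (a b c d e : Int) (t : List Int) :
    large_swap_alt_row (a::b::c::d::e::t) (1 : Int) = a::c::d::e::b::t := by
  have h1 : PySem.List.slice (a::b::c::d::e::t) none (some (1 : Int)) = [a] := by simp [pysem]
  have h2 : PySem.List.slice (a::b::c::d::e::t) (some ((1 : Int) + 1)) (some 5) = [c,d,e] := by norm_num; rw [PySem.List.slice_toNat _ (by norm_num) (by norm_num)]; rfl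
  have h3 : PySem.List.pyGetD (a::b::c::d::e::t) (1 : Int) 0 = b := by simp [pysem]
  have h4 : PySem.List.slice (a::b::c::d::e::t) (some 5) none = t := by simp [pysem]
  simp only [large_swap_alt_row, h1, h2, h3, h4]
  rfl

lemma rowB_4 (a b c d e : Int) (t : List Int) :
    large_swap_alt_row (a::b::c::d::e::t) (0 : Int) = b::c::d::e::a::t := by
  have h1 : PySem.List.slice (a::b::c::d::e::t) none (some (0 : Int)) = ([] : List Int) := by simp [pysem]
  have h2 : PySem.List.slice (a::b::c::d::e::t) (some ((0 : Int) + 1)) (some 5) = [b,c,d,e] := by norm_num; rw [PySem.List.slice_toNat _ (by norm_num) (by norm_num)]; rfl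
  have h3 : PySem.List.pyGetD (a::b::c::d::e::t) (0 : Int) 0 = a := by simp [pysem]
  have h4 : PySem.List.slice (a::b::c::d::e::t) (some 5) none = t := by simp [pysem]
  simp only [large_swap_alt_row, h1, h2, h3, h4]
  rfl

lemma sides_eq (a b c d e : Int) (t : List Int) :
    large_swap (a::b::c::d::e::t) = large_swap_alt (a::b::c::d::e::t) := by
  unfold large_swap large_swap_alt
  rw [pyRange_3_down]
  simp only [List.foldl_cons, List.foldl_nil, stepA_1, stepA_2, stepA_3, stepA_4,
    rowB_1, rowB_2, rowB_3, rowB_4]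
  rfl

-- ===== VERDICT (by name: the statement is the Claim_ definition above) =====
theorem large_swap_spec : Claim_equal_large_swap := by
  intro original _ hpre
  obtain ⟨a, b, c, d, e, t, rfl⟩ : ∃ a b c d e t, original = a :: b :: c :: d :: e :: t := by
    match original, hpre with
    | a :: b :: c :: d :: e :: t, _ => exact ⟨a, b, c, d, e, t, rfl⟩
  exact sides_eq a b c d e t
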